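-- pv_equiv track=rewrite | github.com/launchnlp/FactBench | VERIFY/get_atomic_units.py | text_to_units
-- ===== SOURCE A (Python) =====
-- def text_to_units(text, separator = '- ') -> list[str]:
--     parsed_units = []
--     parsed_labels = []
--     current_unit = []
--     for line in text.strip().splitlines():
--         line = line.strip()
--
--         if line.startswith(separator):
--             if current_unit:
--                 # Process the previous unit if it's completed
--                 full_unit = "\n".join(current_unit).strip()
--                 if ": " in full_unit:
--                     unit, label = full_unit.rsplit(": ", 1)
--                     parsed_units.append(unit.strip())
--                     parsed_labels.append(label.strip())
--                 current_unit = []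
--             # Add the new line to the current unit (without leading '- ')
--             current_unit.append(line[2:].strip())
--         else:
--             # Continue adding lines to the current unit
--             current_unit.append(line.strip())
--
--     # Process the last unit
--     if current_unit:
--         full_unit = "\n".join(current_unit).strip()
--         if ": " in full_unit:
--             unit, label = full_unit.rsplit(": ", 1)
--             parsed_units.append(unit.strip())
--             parsed_labels.append(label.strip())
--
--     return parsed_units, parsed_labels
-- ===== SOURCE B (Python) =====
-- def text_to_units(text, separator = '- ') -> list[str]:
--     # Pass 1: group stripped lines; a line starting with `separator` opens a new
--     # group (contributing line[2:].strip()); leading lines form their own group.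
--     groups = []
--     for line in text.strip().splitlines():
--         line = line.strip()
--         if line.startswith(separator):
--             groups.append([line[2:].strip()])
--         elif groups:
--             groups[-1].append(line)
--         else:
--             groups = [[line]]
--     # Pass 2: parse each group; groups whose joined text lacks ': ' are dropped.
--     parsed_units = []
--     parsed_labels = []
--     for group in groups:
--         full_unit = "\n".join(group).strip()
--         if ": " in full_unit:
--             unit, label = full_unit.rsplit(": ", 1)
--             parsed_units.append(unit.strip())
--             parsed_labels.append(label.strip())
--     return parsed_units, parsed_labels
-- ===== Notes on version B (the rewrite author's own statement) =====
-- stated objective: simpler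
-- what changed: A's single loop with a flush block duplicated at the end of the loop is replaced by two passes: first collect the lines into groups (a new group per separator line), then parse every group uniformly, so the unit-parsing code appears once.
import Mathlib
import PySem

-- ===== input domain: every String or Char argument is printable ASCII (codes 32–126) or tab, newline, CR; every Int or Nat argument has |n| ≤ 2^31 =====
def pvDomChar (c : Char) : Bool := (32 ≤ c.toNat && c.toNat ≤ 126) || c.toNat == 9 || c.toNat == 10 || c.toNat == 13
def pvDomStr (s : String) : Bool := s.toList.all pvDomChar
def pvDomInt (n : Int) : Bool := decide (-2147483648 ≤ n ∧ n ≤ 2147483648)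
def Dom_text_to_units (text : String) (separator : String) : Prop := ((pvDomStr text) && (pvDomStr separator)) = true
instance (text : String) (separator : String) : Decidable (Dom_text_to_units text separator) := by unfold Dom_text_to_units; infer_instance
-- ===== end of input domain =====

-- B replaces A's loop with a duplicated end-of-loop flush by a grouping pass plus a
-- single parsing pass over the groups (objective: simpler decomposition, same cost).

-- Shared helper: the unit-parsing block both Pythons contain verbatim:
-- full_unit = "\n".join(cur).strip(); if ": " in full_unit: unit, label = full_unit.rsplit(": ", 1)
-- rsplit(": ", 1) is ported by hand via the last occurrence (Str.rfind) — exact, since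
-- rsplit with maxsplit=1 cuts at the last occurrence of the separator.
def pvParseUnit (cur : List String) : Option (String × String) :=
  let full := PySem.Str.strip (PySem.Str.join "\n" cur)
  if PySem.Str.isIn ": " full then
    let i := PySem.Str.rfind full ": "
    some (PySem.Str.strip (PySem.Str.slice full none (some i)),
          PySem.Str.strip (PySem.Str.slice full (some (i + 2)) none))
  else none

-- appending unit.strip()/label.strip() to the two result lists (or nothing)
def pvPush (acc : List String × List String) (r : Option (String × String)) :
    List String × List String :=
  match r with
  | some (u, lab) => (acc.1 ++ [u], acc.2 ++ [lab])
  | none => acc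

-- ===== PORT A =====
-- loop body of A: state = ((parsed_units, parsed_labels), current_unit)
def pvStepA (separator : String) (st : (List String × List String) × List String)
    (line0 : String) : (List String × List String) × List String :=
  let line := PySem.Str.strip line0
  if PySem.Str.startswith line separator then
    let acc := if st.2 ≠ [] then pvPush st.1 (pvParseUnit st.2) else st.1
    (acc, [PySem.Str.strip (PySem.Str.slice line (some 2) none)])
  else
    (st.1, st.2 ++ [PySem.Str.strip line])

def text_to_units (text : String) (separator : String) : List String × List String :=
  let st := (PySem.Str.splitlines (PySem.Str.strip text)).foldl (pvStepA separator) (([], []), [])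
  if st.2 ≠ [] then pvPush st.1 (pvParseUnit st.2) else st.1

-- ===== PORT B =====
-- pass 1 body of B: state = the list of groups, the last one still open
def pvStepB (separator : String) (gs : List (List String)) (line0 : String) :
    List (List String) :=
  let line := PySem.Str.strip line0
  if PySem.Str.startswith line separator then
    gs ++ [[PySem.Str.strip (PySem.Str.slice line (some 2) none)]]
  else
    match gs.getLast? with
    | some g => gs.dropLast ++ [g ++ [line]]
    | none => [[line]]

def text_to_units_alt (text : String) (separator : String) : List String × List String :=
  let groups := (PySem.Str.splitlines (PySem.Str.strip text)).foldl (pvStepB separator) []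
  groups.foldl (fun acc g => pvPush acc (pvParseUnit g)) ([], [])

-- ===== PRECONDITION & SPEC =====
def Spec_text_to_units (text : String) (separator : String) (out : List String × List String) : Prop := out = text_to_units_alt text separator
instance (text : String) (separator : String) (out : List String × List String) : Decidable (Spec_text_to_units text separator out) := by unfold Spec_text_to_units; infer_instance

-- ===== CLAIM (what is proved, stated in full; the proofs are below) =====
def Claim_equal_text_to_units : Prop := ∀ (text : String) (separator : String), Dom_text_to_units text separator → Spec_text_to_units text separator (text_to_units text separator)

-- ===== LEMMAS AND PROOFS =====

lemma pv_dropWhile_idem (p : Char → Bool) (l : List Char) :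
    (l.dropWhile p).dropWhile p = l.dropWhile p := by
  rw [List.dropWhile_eq_self_iff]
  intro hl
  exact List.dropWhile_get_zero_not p l hl

lemma pv_chars_strip_idem (l : List Char) :
    PySem.Chars.strip (PySem.Chars.strip l) = PySem.Chars.strip l := by
  simp only [PySem.Chars.strip, PySem.Chars.rstrip, PySem.Chars.lstrip]
  set p := PySem.Chars.isspace
  set x := l.dropWhile p with hx
  set y := ((x.reverse).dropWhile p).reverse with hy
  have hyx : y <+: x := by
    rw [← List.reverse_suffix, hy, List.reverse_reverse]
    exact List.dropWhile_suffix p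
  have hy1 : y.dropWhile p = y := by
    rw [List.dropWhile_eq_self_iff]
    intro hl
    have hlen : 0 < x.length := lt_of_lt_of_le hl hyx.length_le
    have := List.dropWhile_get_zero_not p l hlen
    rwa [hyx.getElem hl]
  rw [hy1, hy, List.reverse_reverse, pv_dropWhile_idem]

lemma pv_strip_idem (s : String) :
    PySem.Str.strip (PySem.Str.strip s) = PySem.Str.strip s := by
  apply String.toList_inj.mp
  rw [PySem.Str.toList_strip, PySem.Str.toList_strip, pv_chars_strip_idem]

-- the invariant tying A's loop state to B's list of groups
def pvR (st : (List String × List String) × List String) (gs : List (List String)) : Prop :=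
  (st = (([], []), []) ∧ gs = []) ∨
  (∃ gsc, gs = gsc ++ [st.2] ∧ st.2 ≠ [] ∧
    st.1 = gsc.foldl (fun acc g => pvPush acc (pvParseUnit g)) ([], []))

lemma pv_step (separator : String) (st : (List String × List String) × List String)
    (gs : List (List String)) (line0 : String) (h : pvR st gs) :
    pvR (pvStepA separator st line0) (pvStepB separator gs line0) := by
  unfold pvStepA pvStepB
  by_cases hsw : PySem.Str.startswith (PySem.Str.strip line0) separator = true
  · simp only [hsw, if_pos]
    rcases h with ⟨hst, hgs⟩ | ⟨gsc, hgs, hne, hacc⟩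
    · subst hgs; rw [hst]
      refine Or.inr ⟨[], by simp, by simp, by simp⟩
    · refine Or.inr ⟨gs, rfl, by simp, ?_⟩
      rw [if_pos hne, hgs, List.foldl_append, List.foldl_cons, List.foldl_nil, hacc]
  · simp only [hsw, if_neg, Bool.false_eq_true, not_false_iff]
    have hdd : PySem.Str.strip (PySem.Str.strip line0) = PySem.Str.strip line0 :=
      pv_strip_idem line0
    rcases h with ⟨hst, hgs⟩ | ⟨gsc, hgs, hne, hacc⟩
    · subst hgs; rw [hst]
      refine Or.inr ⟨[], by simp [hdd], by simp, by simp⟩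
    · rw [hgs, List.getLast?_concat, List.dropLast_concat]
      exact Or.inr ⟨gsc, by simp [hdd], by simp, hacc⟩

lemma pv_loop (separator : String) (lines : List String)
    (st : (List String × List String) × List String) (gs : List (List String))
    (h : pvR st gs) :
    pvR (lines.foldl (pvStepA separator) st) (lines.foldl (pvStepB separator) gs) := by
  induction lines generalizing st gs with
  | nil => exact h
  | cons l t ih => exact ih _ _ (pv_step separator st gs l h)

-- ===== VERDICT (by name: the statement is the Claim_ definition above) =====
theorem text_to_units_spec : Claim_equal_text_to_units := by
  intro text separator _
  unfold Spec_text_to_units text_to_units text_to_units_alt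
  have h := pv_loop separator (PySem.Str.splitlines (PySem.Str.strip text))
    (([], []), []) [] (Or.inl ⟨rfl, rfl⟩)
  rcases h with ⟨hst, hgs⟩ | ⟨gsc, hgs, hne, hacc⟩
  · rw [hst, hgs]; simp
  · rw [hgs, List.foldl_append, List.foldl_cons, List.foldl_nil, ← hacc]
    simp [hne]
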